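-- pv_equiv track=rewrite | github.com/Electrostatics/apbs-pdb2pqr | propka30/Source/mutate.py | generateCombinatorialInformation
-- ===== SOURCE A (Python) =====
-- def generateCombinatorialInformation(number_of_mutations):
--     """
--     generating the number of combinations and the base vector to generate combinatorial mutations.
--     """
--     base = []
--     max_combinations = 1
--     for counter in range(number_of_mutations):
--       base.append(max_combinations)
--       max_combinations *= 2
--     base.reverse()
--
--     return  max_combinations, base
-- ===== SOURCE B (Python) =====
-- def generateCombinatorialInformation(number_of_mutations):
--     """
--     generating the number of combinations and the base vector to generate combinatorial mutations.
--     """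
--     max_combinations = 2 ** max(number_of_mutations, 0)
--     base = []
--     v = max_combinations
--     while v > 1:
--         v //= 2
--         base.append(v)
--     return max_combinations, base
-- ===== Notes on version B (the rewrite author's own statement) =====
-- stated objective: alternative
-- what changed: Computes the total as a closed-form power first and then derives the base vector from that total top-down by repeated halving in a while loop, instead of building the list bottom-up with a doubling accumulator and reversing it.
import Mathlib
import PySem

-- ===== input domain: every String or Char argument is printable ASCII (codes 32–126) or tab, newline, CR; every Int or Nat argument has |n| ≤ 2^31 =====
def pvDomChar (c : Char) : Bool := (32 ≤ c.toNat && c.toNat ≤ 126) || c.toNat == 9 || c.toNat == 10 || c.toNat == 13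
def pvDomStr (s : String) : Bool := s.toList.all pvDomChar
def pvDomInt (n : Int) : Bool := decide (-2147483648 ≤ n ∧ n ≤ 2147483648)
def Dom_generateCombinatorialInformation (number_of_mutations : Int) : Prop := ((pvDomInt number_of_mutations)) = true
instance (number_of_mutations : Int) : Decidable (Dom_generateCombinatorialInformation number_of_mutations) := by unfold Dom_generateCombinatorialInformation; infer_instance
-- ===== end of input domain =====

-- B computes the total 2**n in closed form first and derives the base vector from it
-- top-down by repeated halving, instead of A's bottom-up doubling accumulator plus reverse.

-- ===== PORT A =====
-- A: loop appending a doubling accumulator, then reverse the list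
def generateCombinatorialInformation (number_of_mutations : Int) : Int × List Int :=
  let s := (PySem.List.pyRange 0 number_of_mutations 1).foldl
    (fun (s : List Int × Int) _ => (s.1 ++ [s.2], s.2 * 2)) ([], 1)
  (s.2, s.1.reverse)

-- ===== PORT B =====
-- B's while loop 'while v > 1: v //= 2; base.append(v)' as structural recursion on v
def pvHalve (v : Int) : List Int :=
  if h : 1 < v then
    let w := PySem.Int.floordiv v 2
    w :: pvHalve w
  else []
termination_by v.toNat
decreasing_by
  rw [PySem.Int.floordiv_eq_ediv_of_pos (by omega)]
  omega

-- B: total = 2 ** max(n, 0) (exponent nonnegative, so '.toNat' is exact), then halve down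
def generateCombinatorialInformation_alt (number_of_mutations : Int) : Int × List Int :=
  let max_combinations : Int := 2 ^ (max number_of_mutations 0).toNat
  (max_combinations, pvHalve max_combinations)

-- ===== PRECONDITION & SPEC =====
def Spec_generateCombinatorialInformation (number_of_mutations : Int) (out : Int × List Int) : Prop := out = generateCombinatorialInformation_alt number_of_mutations
instance (number_of_mutations : Int) (out : Int × List Int) : Decidable (Spec_generateCombinatorialInformation number_of_mutations out) := by unfold Spec_generateCombinatorialInformation; infer_instance

-- ===== CLAIM (what is proved, stated in full; the proofs are below) =====
def Claim_equal_generateCombinatorialInformation : Prop := ∀ (number_of_mutations : Int), Dom_generateCombinatorialInformation number_of_mutations → Spec_generateCombinatorialInformation number_of_mutations (generateCombinatorialInformation number_of_mutations)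

-- ===== LEMMAS AND PROOFS =====
lemma pvFoldA (m : Nat) (acc : List Int) (c : Int) :
    (List.range m).foldl (fun (s : List Int × Int) _ => (s.1 ++ [s.2], s.2 * 2)) (acc, c)
      = (acc ++ (List.range m).map (fun k => c * 2 ^ k), c * 2 ^ m) := by
  induction m generalizing acc c with
  | zero => simp
  | succ m ih =>
    rw [List.range_succ, List.foldl_append, ih]
    simp [pow_succ, mul_assoc]

lemma pvHalve_pow (m : Nat) :
    pvHalve ((2 : Int) ^ m) = ((List.range m).map (fun k => (2 : Int) ^ k)).reverse := by
  induction m with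
  | zero => rw [pvHalve]; simp
  | succ m ih =>
    rw [pvHalve]
    have h1 : (1 : Int) < 2 ^ (m + 1) := by
      calc (1:Int) < 2 * 1 := by norm_num
        _ ≤ 2 * 2 ^ m := by nlinarith [pow_pos (by norm_num : (0:Int) < 2) m]
        _ = 2 ^ (m + 1) := by ring
    have h2 : PySem.Int.floordiv ((2 : Int) ^ (m + 1)) 2 = 2 ^ m := by
      rw [PySem.Int.floordiv_eq_ediv_of_pos (by norm_num), pow_succ]
      omega
    simp only [h1, dif_pos, h2, ih, List.range_succ]
    simp

-- ===== VERDICT (by name: the statement is the Claim_ definition above) =====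
theorem generateCombinatorialInformation_spec : Claim_equal_generateCombinatorialInformation := by
  intro n _
  unfold Spec_generateCombinatorialInformation generateCombinatorialInformation
    generateCombinatorialInformation_alt
  rw [PySem.List.pyRange_one]
  simp only [List.foldl_map, sub_zero]
  rw [pvFoldA]
  have hm : (max n 0).toNat = n.toNat := by omega
  rw [hm, pvHalve_pow]
  simp
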